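-- pv_equiv track=rewrite | github.com/lsq980114/KAVER | KG_CoT_Model/produce.py | extract_question_entities
-- ===== SOURCE A (Python) =====
-- def extract_question_entities(question, id2name, id2ent):
--     question_lower = question.lower()
--     relevant_entities = []
--
--     for ent_id, ent_name in id2name.items():
--         if ent_name != '-' and ent_name.lower() in question_lower:
--             relevant_entities.append((ent_id, ent_name, 'exact_match'))
--
--     for ent_id, ent_name in id2ent.items():
--         if ent_name.lower() in question_lower:
--             relevant_entities.append((ent_id, ent_name, 'fuzzy_match'))
--
--     relevant_entities.sort(key=lambda x: (x[2] == 'exact_match', len(x[1])), reverse=True)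
--
--     seen_ids = set()
--     unique_entities = []
--     for ent_id, ent_name, match_type in relevant_entities:
--         if ent_id not in seen_ids:
--             unique_entities.append(ent_id)
--             seen_ids.add(ent_id)
--
--     return unique_entities[:10]
-- ===== SOURCE B (Python) =====
-- def extract_question_entities(question, id2name, id2ent):
--     q = question.lower()
--
--     def bucketize(pairs, skip_dash):
--         # group matching ids into buckets keyed by name length
--         b = {}
--         for ent_id, ent_name in pairs.items():
--             if (not skip_dash or ent_name != '-') and ent_name.lower() in q:
--                 b.setdefault(len(ent_name), []).append(ent_id)
--         return b
--
--     out, seen = [], set()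
--     for b in (bucketize(id2name, True), bucketize(id2ent, False)):
--         for length in range(max(b, default=0), -1, -1):
--             for ent_id in b.get(length, []):
--                 if ent_id not in seen and len(out) < 10:
--                     seen.add(ent_id)
--                     out.append(ent_id)
--     return out
-- ===== Notes on version B (the rewrite author's own statement) =====
-- stated objective: alternative
-- what changed: B eliminates A's tagged tuple list, comparison sort and dedup-then-slice: each group's matching ids are grouped into a dict of buckets keyed by name length (pigeonhole instead of sorting), the buckets are walked from the longest length down to 0, and ids are emitted through a seen-set that stops filling at 10.
import Mathlib
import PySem

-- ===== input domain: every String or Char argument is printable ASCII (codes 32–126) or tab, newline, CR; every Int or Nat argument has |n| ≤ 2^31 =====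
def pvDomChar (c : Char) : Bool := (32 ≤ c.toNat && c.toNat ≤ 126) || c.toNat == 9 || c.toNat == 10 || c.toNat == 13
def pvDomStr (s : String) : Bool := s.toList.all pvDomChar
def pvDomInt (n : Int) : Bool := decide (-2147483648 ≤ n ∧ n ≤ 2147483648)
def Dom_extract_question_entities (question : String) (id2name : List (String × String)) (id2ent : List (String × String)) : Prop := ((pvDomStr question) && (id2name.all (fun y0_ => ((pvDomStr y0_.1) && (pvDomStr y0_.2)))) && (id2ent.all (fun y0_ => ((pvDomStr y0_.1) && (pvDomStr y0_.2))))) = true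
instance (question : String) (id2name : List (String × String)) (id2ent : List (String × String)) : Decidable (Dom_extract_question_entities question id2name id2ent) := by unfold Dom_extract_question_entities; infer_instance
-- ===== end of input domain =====

-- B replaces A's tagged comparison sort + dedup-then-slice pipeline by a bucket (pigeonhole)
-- grouping: matching ids are grouped into a dict keyed by name length, buckets are then walked
-- from the longest length down while ids are emitted with a seen-set until 10 are collected
-- (objective: alternative — no comparison sort at all).

-- ===== PORT A =====
-- dict parameters arrive as association lists; '.items()' iterates the dict built from them,
-- i.e. (PySem.Dict.ofList …).items, exactly Python's dict(pairs).items().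
def extract_question_entities (question : String) (id2name : List (String × String)) (id2ent : List (String × String)) : List String :=
  let question_lower := PySem.Str.lower question
  -- first loop: exact matches over id2name.items()
  let relevant1 := ((PySem.Dict.ofList id2name).items).foldl
    (fun acc p => if p.2 != "-" && PySem.Str.isIn (PySem.Str.lower p.2) question_lower
                  then acc ++ [(p.1, p.2, "exact_match")] else acc) []
  -- second loop: fuzzy matches over id2ent.items(), appended to the same list
  let relevant2 := ((PySem.Dict.ofList id2ent).items).foldl
    (fun acc p => if PySem.Str.isIn (PySem.Str.lower p.2) question_lower
                  then acc ++ [(p.1, p.2, "fuzzy_match")] else acc) relevant1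
  -- sort(key=lambda x: (x[2] == 'exact_match', len(x[1])), reverse=True)
  let srt := PySem.List.sorted2 relevant2 (fun x => x.2.2 == "exact_match") (fun x => PySem.Str.len x.2.1) true
  -- dedup loop with a seen set, then [:10]
  let uniq := (srt.foldl
    (fun st x => if PySem.Set.contains st.1 x.1 then st else (PySem.Set.add st.1 x.1, st.2 ++ [x.1]))
    ((PySem.Set.empty : PySem.Set String), ([] : List String))).2
  PySem.List.slice uniq none (some 10)

-- ===== PORT B =====
-- Source B's inner loop body: emit ent_id if unseen and fewer than 10 collected
def pvEmit (st : List String × PySem.Set String) (i : String) : List String × PySem.Set String :=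
  if !(PySem.Set.contains st.2 i) && decide (st.1.length < 10)
  then (st.1 ++ [i], PySem.Set.add st.2 i) else st

-- Source B's bucketize: group matching ids into buckets keyed by name length
-- ('b.setdefault(L, []).append(ent_id)' appends to b.get(L, []): Dict.modify L [] (· ++ [ent_id]))
def pvBucketize (q : String) (pairs : List (String × String)) (skipDash : Bool) :
    PySem.Dict Int (List String) :=
  pairs.foldl
    (fun b p =>
      if (!skipDash || p.2 != "-") && PySem.Str.isIn (PySem.Str.lower p.2) q then
        b.modify (PySem.Str.len p.2) [] (fun v => v ++ [p.1])
      else b)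
    PySem.Dict.empty

def extract_question_entities_alt (question : String) (id2name : List (String × String)) (id2ent : List (String × String)) : List String :=
  let q := PySem.Str.lower question
  -- for b in (bucketize(id2name, True), bucketize(id2ent, False)):
  --   for length in range(max(b, default=0), -1, -1):
  --     for ent_id in b.get(length, []): … emit with seen set, stop filling at 10
  ([pvBucketize q ((PySem.Dict.ofList id2name).items) true,
    pvBucketize q ((PySem.Dict.ofList id2ent).items) false].foldl
    (fun st b =>
      (PySem.List.pyRange (PySem.List.maxD b.keys (fun k => k) 0) (-1) (-1)).foldl
        (fun st d => (b.getD d []).foldl pvEmit st) st)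
    (([] : List String), (PySem.Set.empty : PySem.Set String))).1

-- ===== PRECONDITION & SPEC =====
def Spec_extract_question_entities (question : String) (id2name : List (String × String)) (id2ent : List (String × String)) (out : List String) : Prop := out = extract_question_entities_alt question id2name id2ent
instance (question : String) (id2name : List (String × String)) (id2ent : List (String × String)) (out : List String) : Decidable (Spec_extract_question_entities question id2name id2ent out) := by unfold Spec_extract_question_entities; infer_instance

-- ===== CLAIM (what is proved, stated in full; the proofs are below) =====
def Claim_equal_extract_question_entities : Prop := ∀ (question : String) (id2name : List (String × String)) (id2ent : List (String × String)), Dom_extract_question_entities question id2name id2ent → Spec_extract_question_entities question id2name id2ent (extract_question_entities question id2name id2ent)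

-- ===== LEMMAS AND PROOFS =====

-- full (unbounded) first-occurrence dedup of an id list, threading a seen set
def pvDedup (seen : PySem.Set String) : List String → List String
  | [] => []
  | i :: t => if PySem.Set.contains seen i then pvDedup seen t
              else i :: pvDedup (PySem.Set.add seen i) t

-- A's dedup fold computes out ++ pvDedup seen ids
theorem pvFoldDedup (L : List (String × String × String)) :
    ∀ (seen : PySem.Set String) (out : List String),
    (L.foldl (fun st x => if PySem.Set.contains st.1 x.1 then st
                          else (PySem.Set.add st.1 x.1, st.2 ++ [x.1])) (seen, out)).2
      = out ++ pvDedup seen (L.map (·.1)) := by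
  induction L with
  | nil => intro seen out; simp [pvDedup]
  | cons p t ih =>
    intro seen out
    by_cases h : p.1 ∈ seen
    · have hc : PySem.Set.contains seen p.1 = true := (PySem.Set.contains_iff seen p.1).2 h
      simp only [List.foldl_cons, List.map_cons, pvDedup]
      rw [if_pos hc, if_pos hc]
      exact ih seen out
    · have hc : ¬ PySem.Set.contains seen p.1 = true :=
        fun hc => h ((PySem.Set.contains_iff seen p.1).1 hc)
      simp only [List.foldl_cons, List.map_cons, pvDedup]
      rw [if_neg hc, if_neg hc, ih]
      simp

-- B's emit loop computes the first (10 - out.length) elements of the full dedup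
theorem pvEmitDedup (ids : List String) :
    ∀ (seen : PySem.Set String) (out : List String),
    (ids.foldl pvEmit (out, seen)).1 = out ++ (pvDedup seen ids).take (10 - out.length) := by
  induction ids with
  | nil => intro seen out; simp [pvDedup]
  | cons i t ih =>
    intro seen out
    by_cases h : i ∈ seen
    · have hc : PySem.Set.contains seen i = true := (PySem.Set.contains_iff seen i).2 h
      simp only [List.foldl_cons, pvEmit, pvDedup, hc]
      simpa using ih seen out
    · have hc : PySem.Set.contains seen i = false :=
        Bool.eq_false_iff.2 (fun hc => h ((PySem.Set.contains_iff seen i).1 hc))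
      by_cases h10 : out.length < 10
      · simp only [List.foldl_cons, pvEmit, pvDedup, hc, h10]
        simp only [Bool.not_false, decide_true, Bool.and_self, if_true]
        rw [ih]
        have h1 : 10 - out.length = (10 - (out ++ [i]).length) + 1 := by simp; omega
        simp only [Bool.false_eq_true, if_false, h1, List.take_succ_cons]
        simp
      · simp only [List.foldl_cons, pvEmit, pvDedup, hc, h10]
        simp only [decide_false, Bool.and_false]
        rw [ih]
        have : 10 - out.length = 0 := by omega
        simp [this]

-- insertBy skips past a block of elements it never goes before
theorem pvInsertBy_skip {α : Type} (b : α → α → Bool) (x : α) (A B : List α)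
    (h : ∀ a ∈ A, b x a = false) :
    PySem.List.insertBy b x (A ++ B) = A ++ PySem.List.insertBy b x B := by
  induction A with
  | nil => simp
  | cons a t ih =>
    simp only [List.cons_append, PySem.List.insertBy, h a (by simp)]
    simp only [Bool.false_eq_true, if_false]
    rw [ih (fun a ha => h a (by simp [ha]))]

-- insertBy goes in front of a list every element of which it goes before
theorem pvInsertBy_front {α : Type} (b : α → α → Bool) (x : α) (l : List α)
    (h : ∀ a ∈ l, b x a = true) :
    PySem.List.insertBy b x l = x :: l := by
  cases l with
  | nil => rfl
  | cons a t => simp [PySem.List.insertBy, h a (by simp)]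

-- inserting x into buckets flattened along a strictly descending key list appends x to its bucket
theorem pvInsertFlat {α : Type} (f : α → Int) (x : α) :
    ∀ (ds : List Int) (g : Int → List α),
    ds.Pairwise (· > ·) → f x ∈ ds → (∀ d ∈ ds, ∀ a ∈ g d, f a = d) →
    PySem.List.insertBy (fun u v => decide (f v < f u)) x (ds.flatMap g)
      = ds.flatMap (fun d => if d = f x then g d ++ [x] else g d) := by
  intro ds
  induction ds with
  | nil => intro g _ hx _; exact absurd hx (by simp)
  | cons d t ih =>
    intro g hp hx hg
    have hskip : ∀ a ∈ g d, (fun u v => decide (f v < f u)) x a = false := by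
      intro a ha
      have : f a = d := hg d (by simp) a ha
      by_cases hd : d = f x
      · simp [this, hd]
      · have hdt : f x ∈ t := by
          rcases (List.mem_cons.1 hx) with h | h
          · exact absurd h.symm hd
          · exact h
        have : d > f x := (List.pairwise_cons.1 hp).1 _ hdt
        simp only [decide_eq_false_iff_not]
        omega
    by_cases hd : d = f x
    · have hfront : ∀ a ∈ t.flatMap g, (fun u v => decide (f v < f u)) x a = true := by
        intro a ha
        rcases List.mem_flatMap.1 ha with ⟨d', hd', ha'⟩
        have h1 : f a = d' := hg d' (by simp [hd']) a ha'
        have h2 : d > d' := (List.pairwise_cons.1 hp).1 _ hd'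
        simp only [decide_eq_true_eq]
        omega
      have htne : ∀ d' ∈ t, ¬ (d' = f x) := by
        intro d' hd'
        have : d > d' := (List.pairwise_cons.1 hp).1 _ hd'
        omega
      rw [List.flatMap_cons, pvInsertBy_skip _ _ _ _ hskip, pvInsertBy_front _ _ _ hfront,
          List.flatMap_cons, if_pos hd]
      rw [List.flatMap_congr (l := t) (f := fun d => if d = f x then g d ++ [x] else g d) (g := g)
        (fun d' hd' => by simp only [if_neg (htne d' hd')])]
      simp
    · have hdt : f x ∈ t := by
        rcases (List.mem_cons.1 hx) with h | h
        · exact absurd h.symm hd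
        · exact h
      rw [List.flatMap_cons, pvInsertBy_skip _ _ _ _ hskip,
          ih g (List.pairwise_cons.1 hp).2 hdt (fun d' hd' => hg d' (by simp [hd'])),
          List.flatMap_cons, if_neg hd]

-- stable descending insertion sort = flatten of the per-key buckets along a strictly
-- descending key list covering all keys
theorem pvSortFlat {α : Type} (f : α → Int) (ds : List Int) (hp : ds.Pairwise (· > ·)) :
    ∀ (L P : List α), (∀ x ∈ L, f x ∈ ds) →
    L.foldl (fun acc x => PySem.List.insertBy (fun u v => decide (f v < f u)) x acc)
        (ds.flatMap (fun d => P.filter (fun x => f x == d)))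
      = ds.flatMap (fun d => (P ++ L).filter (fun x => f x == d)) := by
  intro L
  induction L with
  | nil => intro P _; simp
  | cons x t ih =>
    intro P hL
    simp only [List.foldl_cons]
    rw [pvInsertFlat f x ds _ hp (hL x (by simp))
      (fun d hd a ha => eq_of_beq (List.mem_filter.1 ha).2)]
    have hre : (fun d => if d = f x then (P.filter (fun y => f y == d)) ++ [x]
                         else P.filter (fun y => f y == d))
        = fun d => (P ++ [x]).filter (fun y => f y == d) := by
      funext d
      rw [List.filter_append]
      by_cases hd : d = f x
      · simp [hd, List.filter]
      · have : (f x == d) = false := by simp [Ne.symm hd]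
        simp [hd, List.filter, this]
    rw [hre, ih (P ++ [x]) (fun y hy => hL y (by simp [hy])), List.append_assoc]
    rfl

-- A's append-if loops build tagged filtered lists
theorem pvBuild (L : List (String × String)) (t : String)
    (p : (String × String) → Bool) (acc : List (String × String × String)) :
    L.foldl (fun acc x => if p x then acc ++ [(x.1, x.2, t)] else acc) acc
      = acc ++ (L.filter p).map (fun x => (x.1, x.2, t)) := by
  rw [PySem.List.foldl_append_if p (fun x => (x.1, x.2, t))]

-- insertBy commutes with map when the comparator factors through the map
theorem pvInsertBy_map {α β : Type} (b : α → α → Bool) (b' : β → β → Bool) (f : α → β)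
    (hf : ∀ a c, b' (f a) (f c) = b a c) (x : α) (l : List α) :
    PySem.List.insertBy b' (f x) (l.map f) = (PySem.List.insertBy b x l).map f := by
  induction l with
  | nil => rfl
  | cons a t ih =>
    simp only [List.map_cons, PySem.List.insertBy, hf x a]
    by_cases h : b x a = true <;> simp [h, ih]

-- hence insertion sort commutes with map
theorem pvFoldInsert_map {α β : Type} (b : α → α → Bool) (b' : β → β → Bool) (f : α → β)
    (hf : ∀ a c, b' (f a) (f c) = b a c) (l : List α) :
    ∀ acc : List α,
    (l.map f).foldl (fun acc x => PySem.List.insertBy b' x acc) (acc.map f)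
      = (l.foldl (fun acc x => PySem.List.insertBy b x acc) acc).map f := by
  induction l with
  | nil => intro acc; rfl
  | cons a t ih =>
    intro acc
    simp only [List.map_cons, List.foldl_cons]
    rw [pvInsertBy_map b b' f hf a acc, ih]

-- a fold of insertions that all skip past the block A leaves A in front
theorem pvFoldInsert_skip {α : Type} (b : α → α → Bool) (Y : List α) :
    ∀ (A Bs : List α), (∀ y ∈ Y, ∀ a ∈ A, b y a = false) →
    Y.foldl (fun acc x => PySem.List.insertBy b x acc) (A ++ Bs)
      = A ++ Y.foldl (fun acc x => PySem.List.insertBy b x acc) Bs := by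
  induction Y with
  | nil => intro A Bs _; simp
  | cons y t ih =>
    intro A Bs h
    simp only [List.foldl_cons]
    rw [pvInsertBy_skip b y A Bs (h y (by simp)),
        ih A _ (fun y' hy' a ha => h y' (by simp [hy']) a ha)]

-- the two comparators of A's tagged sort
def pvCmpA : (String × String × String) → (String × String × String) → Bool :=
  fun a c =>
    decide ((c.2.2 == "exact_match") < (a.2.2 == "exact_match"))
    || (!decide ((a.2.2 == "exact_match") < (c.2.2 == "exact_match"))
        && decide (PySem.Str.len c.2.1 < PySem.Str.len a.2.1))

def pvCmpB : (String × String) → (String × String) → Bool :=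
  fun a c => decide (PySem.Str.len c.2 < PySem.Str.len a.2)

theorem pvSorted2_eq (X Y : List (String × String)) (tx ty : String) (hxy : tx ≠ ty)
    (hx : tx = "exact_match") :
    PySem.List.sorted2 (X.map (fun p => (p.1, p.2, tx)) ++ Y.map (fun p => (p.1, p.2, ty)))
        (fun x => x.2.2 == "exact_match") (fun x => PySem.Str.len x.2.1) true
      = (PySem.List.sorted X (fun p => PySem.Str.len p.2) true).map (fun p => (p.1, p.2, tx))
        ++ (PySem.List.sorted Y (fun p => PySem.Str.len p.2) true).map (fun p => (p.1, p.2, ty)) := by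
  have hty : (ty == "exact_match") = false := by
    subst hx; simp [BEq.beq]; exact fun h => hxy h.symm
  have htx : (tx == "exact_match") = true := by subst hx; simp
  show (X.map (fun p => (p.1, p.2, tx)) ++ Y.map (fun p => (p.1, p.2, ty))).foldl
      (fun acc x => PySem.List.insertBy pvCmpA x acc) []
    = _
  rw [List.foldl_append]
  have hXblock : (X.map (fun p => (p.1, p.2, tx))).foldl
      (fun acc x => PySem.List.insertBy pvCmpA x acc) []
      = (PySem.List.sorted X (fun p => PySem.Str.len p.2) true).map (fun p => (p.1, p.2, tx)) := by
    have : ([] : List (String × String × String)) = List.map (fun (p : String × String) => (p.1, p.2, tx)) [] := rfl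
    rw [this, pvFoldInsert_map pvCmpB pvCmpA (fun p => (p.1, p.2, tx))
      (by intro a c; simp [pvCmpA, pvCmpB, htx]) X []]
    rfl
  have hYsort : (Y.map (fun p => (p.1, p.2, ty))).foldl
      (fun acc x => PySem.List.insertBy pvCmpA x acc) []
      = (PySem.List.sorted Y (fun p => PySem.Str.len p.2) true).map (fun p => (p.1, p.2, ty)) := by
    have : ([] : List (String × String × String)) = List.map (fun (p : String × String) => (p.1, p.2, ty)) [] := rfl
    rw [this, pvFoldInsert_map pvCmpB pvCmpA (fun p => (p.1, p.2, ty))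
      (by intro a c; simp [pvCmpA, pvCmpB, hty]) Y []]
    rfl
  rw [hXblock]
  have hskip : ∀ y ∈ Y.map (fun p => (p.1, p.2, ty)),
      ∀ a ∈ (PySem.List.sorted X (fun p => PySem.Str.len p.2) true).map (fun p => (p.1, p.2, tx)),
      pvCmpA y a = false := by
    intro y hy a ha
    simp only [List.mem_map] at hy ha
    obtain ⟨py, _, rfl⟩ := hy
    obtain ⟨pa, _, rfl⟩ := ha
    simp [pvCmpA, htx, hty]
  have := pvFoldInsert_skip pvCmpA (Y.map (fun p => (p.1, p.2, ty)))
    ((PySem.List.sorted X (fun p => PySem.Str.len p.2) true).map (fun p => (p.1, p.2, tx))) [] hskip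
  rw [List.append_nil] at this
  rw [this, hYsort]

-- B's buckets, flattened from the max key down to 0, are exactly the ids of the
-- length-descending stable sort of the filtered pairs
theorem pvFlatBucket (q : String) (pairs : List (String × String)) (skipDash : Bool)
    (pred : (String × String) → Bool)
    (hpred : ∀ p, ((!skipDash || p.2 != "-") && PySem.Str.isIn (PySem.Str.lower p.2) q) = pred p) :
    (PySem.List.pyRange
        (PySem.List.maxD (pvBucketize q pairs skipDash).keys (fun k => k) 0) (-1) (-1)).flatMap
      (fun d => (pvBucketize q pairs skipDash).getD d [])
      = (PySem.List.sorted (pairs.filter pred) (fun p => PySem.Str.len p.2) true).map (·.1) := by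
  set F := pairs.filter pred with hF
  have hbkt : pvBucketize q pairs skipDash
      = F.foldl (fun b p => b.modify (PySem.Str.len p.2) [] (fun v => v ++ [p.1]))
          PySem.Dict.empty := by
    have hstep : pairs.foldl
        (fun (b : PySem.Dict Int (List String)) p =>
          if (!skipDash || p.2 != "-") && PySem.Str.isIn (PySem.Str.lower p.2) q then
            b.modify (PySem.Str.len p.2) [] (fun v => v ++ [p.1]) else b) PySem.Dict.empty
      = pairs.foldl
        (fun (b : PySem.Dict Int (List String)) p =>
          if pred p then b.modify (PySem.Str.len p.2) [] (fun v => v ++ [p.1]) else b)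
        PySem.Dict.empty := by
      apply PySem.List.foldl_congr_mem
      intro b p _
      rw [hpred p]
    unfold pvBucketize
    rw [hstep, PySem.List.foldl_if_eq_foldl_filter]
  -- bucket contents
  have hgetD : ∀ d, (pvBucketize q pairs skipDash).getD d []
      = (F.filter (fun p => PySem.Str.len p.2 == d)).map (·.1) := by
    intro d
    rw [hbkt]
    have h1 : F.foldl (fun b p => b.modify (PySem.Str.len p.2) [] (fun v => v ++ [p.1]))
          PySem.Dict.empty
        = (F.map (fun p => (PySem.Str.len p.2, p.1))).foldl
            (fun b p => b.modify p.1 [] (fun v => v ++ [p.2])) PySem.Dict.empty := by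
      rw [List.foldl_map]
    rw [h1, PySem.Dict.getD_foldl_modify_append]
    rw [List.filter_map]
    simp [Function.comp_def]
  -- every bucket key of interest lies in [0, maxD]
  have hkeys : (pvBucketize q pairs skipDash).keys
      = PySem.Set.ofList (F.map (fun p => PySem.Str.len p.2)) := by
    rw [hbkt, PySem.Dict.keys_foldl_modify_key F (fun p => PySem.Str.len p.2) []
      (fun _ p => fun v => v ++ [p.1]) PySem.Dict.empty]
    rw [PySem.Dict.keys_empty, PySem.Set.update_nil_left]
  set D := PySem.List.maxD (pvBucketize q pairs skipDash).keys (fun k => k) 0 with hD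
  have hbound : ∀ p ∈ F, 0 ≤ PySem.Str.len p.2 ∧ PySem.Str.len p.2 ≤ D := by
    intro p hp
    have hlen0 : 0 ≤ PySem.Str.len p.2 := by rw [PySem.Str.len_eq]; positivity
    refine ⟨hlen0, ?_⟩
    have hmem : PySem.Str.len p.2 ∈ (pvBucketize q pairs skipDash).keys := by
      rw [hkeys, PySem.Set.mem_ofList]
      exact List.mem_map.2 ⟨p, hp, rfl⟩
    rw [hD]
    unfold PySem.List.maxD
    cases hmx : PySem.List.max? (pvBucketize q pairs skipDash).keys (fun k => k) with
    | none =>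
      exact absurd ((PySem.List.max?_eq_none_iff _ _).1 hmx ▸ hmem) (by simp)
    | some m =>
      simpa using PySem.List.max?_isMax hmx _ hmem
  -- the descending key list
  have hpair : (PySem.List.pyRange D (-1) (-1)).Pairwise (· > ·) := by
    rw [PySem.List.pyRange_neg_one_eq_reverse, List.pairwise_reverse]
    have := PySem.List.pairwise_lt_pyRange_one (a := (-1 : Int) + 1) (b := D + 1)
    exact this.imp (fun h => h)
  have hmemds : ∀ x ∈ F, PySem.Str.len x.2 ∈ PySem.List.pyRange D (-1) (-1) := by
    intro x hx
    rw [PySem.List.mem_pyRange_neg_one]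
    have := hbound x hx
    omega
  -- flatten = sort
  rw [PySem.List.sorted_rev_eq_foldl_insertBy]
  have hsf := pvSortFlat (fun p : String × String => PySem.Str.len p.2)
    (PySem.List.pyRange D (-1) (-1)) hpair F [] hmemds
  simp only [List.filter_nil, List.nil_append] at hsf
  have hz : (PySem.List.pyRange D (-1) (-1)).flatMap
      (fun _ => ([] : List (String × String))) = [] := by simp
  rw [hz] at hsf
  rw [hsf, List.map_flatMap]
  exact List.flatMap_congr (fun d _ => hgetD d)

-- ===== VERDICT (by name: the statement is the Claim_ definition above) =====
theorem extract_question_entities_spec : Claim_equal_extract_question_entities := by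
  intro question id2name id2ent _
  unfold Spec_extract_question_entities extract_question_entities extract_question_entities_alt
  simp only []
  set ql := PySem.Str.lower question with hql
  set M := (PySem.Dict.ofList id2name).items with hM
  set E := (PySem.Dict.ofList id2ent).items with hE
  set pA : (String × String) → Bool :=
    fun p => p.2 != "-" && PySem.Str.isIn (PySem.Str.lower p.2) ql with hpA
  set pF : (String × String) → Bool :=
    fun p => PySem.Str.isIn (PySem.Str.lower p.2) ql with hpF
  -- A's side: tagged build, sort, dedup, slice
  rw [pvBuild M "exact_match" pA [], pvBuild E "fuzzy_match" pF, List.nil_append]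
  rw [pvSorted2_eq (M.filter pA) (E.filter pF) "exact_match" "fuzzy_match" (by decide) rfl]
  rw [pvFoldDedup]
  simp only [List.nil_append, List.map_append, List.map_map]
  have hcomp : ∀ (t : String),
      ((fun (x : String × String × String) => x.1) ∘ (fun (p : String × String) => (p.1, p.2, t)))
        = fun (p : String × String) => p.1 := by intro t; funext p; rfl
  rw [hcomp, hcomp]
  rw [show ((10 : Int) = ((10 : Nat) : Int)) from rfl, PySem.List.slice_to_natCast]
  -- B's side: two bucket walks with one emit state = emit fold over the two flattened streams
  rw [List.foldl_cons, List.foldl_cons, List.foldl_nil]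
  rw [← List.foldl_flatMap (f := fun d => (pvBucketize ql M true).getD d []) (g := pvEmit),
      ← List.foldl_flatMap (f := fun d => (pvBucketize ql E false).getD d []) (g := pvEmit)]
  rw [← List.foldl_append (f := pvEmit)]
  rw [pvFlatBucket ql M true pA (fun p => by simp [hpA]),
      pvFlatBucket ql E false pF (fun p => by simp [hpF])]
  rw [pvEmitDedup]
  simp
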